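-- pv_equiv track=rewrite | github.com/alex-yung-github/ML-Work | machine learning work/4.5 NN/test.py | truthT
-- ===== SOURCE A (Python) =====
-- import itertools
--
-- def truthT(n, labels):
--     zeTruth = list(itertools.product([0, 1], repeat=n))
--     zeTruth.sort()
--
--     toReturn = []
--     for i in range(len(zeTruth)):
--         val = labels[i]
--         bigman = zeTruth[i]
--         toReturn.append((bigman, int(val)))
--     return toReturn
-- ===== SOURCE B (Python) =====
-- def truthT(n, labels):
--     out = []
--     for i in range(2 ** n):
--         row = tuple((i >> (n - 1 - j)) & 1 for j in range(n))
--         out.append((row, int(labels[i])))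
--     return out
-- ===== Notes on version B (the rewrite author's own statement) =====
-- stated objective: idiomatic
-- what changed: Replaces itertools.product plus a redundant sort with a single loop over range(2**n) that builds each row directly from the bits of the counter i (MSB first), pairing it with labels[i].
import Mathlib
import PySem

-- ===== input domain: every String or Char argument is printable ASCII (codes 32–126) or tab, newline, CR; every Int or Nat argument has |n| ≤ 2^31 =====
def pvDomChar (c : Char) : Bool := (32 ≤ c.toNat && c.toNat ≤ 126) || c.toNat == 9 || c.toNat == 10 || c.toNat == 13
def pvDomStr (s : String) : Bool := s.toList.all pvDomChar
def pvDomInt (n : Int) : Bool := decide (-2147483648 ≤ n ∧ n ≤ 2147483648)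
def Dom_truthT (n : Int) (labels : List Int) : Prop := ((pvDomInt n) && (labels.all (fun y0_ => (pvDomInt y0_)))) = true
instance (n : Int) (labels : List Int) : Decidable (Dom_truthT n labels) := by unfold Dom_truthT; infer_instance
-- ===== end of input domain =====

-- B builds each truth-table row directly from the bits of a counter instead of
-- itertools.product followed by a redundant sort; return values agree on Pre_.

-- ===== PORT A =====
-- itertools.product([0,1], repeat=k): leftmost coordinate varies slowest.
def prodA : Nat → List (List Int)
  | 0 => [[]]
  | k + 1 => ([0, 1] : List Int).flatMap (fun b => (prodA k).map (fun t => b :: t))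

-- n.toNat is safe: Pre_ requires 0 ≤ n (Python raises ValueError for negative repeat).
def truthT (n : Int) (labels : List Int) : List (List Int × Int) :=
  let zeTruth := PySem.List.sorted (prodA n.toNat) (fun x => x)
  (PySem.List.pyRange 0 (PySem.List.len zeTruth) 1).foldl
    (fun toReturn i =>
      toReturn ++ [(PySem.List.pyGetD zeTruth i [], PySem.List.pyGetD labels i 0)]) []

-- ===== PORT B =====
def rowB (n i : Nat) : List Int :=
  (List.range n).map (fun j => (((i >>> (n - 1 - j)) &&& 1 : Nat) : Int))

def truthT_alt (n : Int) (labels : List Int) : List (List Int × Int) :=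
  (List.range (2 ^ n.toNat)).map
    (fun i => (rowB n.toNat i, PySem.List.pyGetD labels (i : Int) 0))

-- ===== PRECONDITION & SPEC =====
-- Pre_ excludes n < 0 (A raises ValueError) and labels shorter than 2^n (A raises IndexError).
def Pre_truthT (n : Int) (labels : List Int) : Prop :=
  0 ≤ n ∧ 2 ^ n.toNat ≤ labels.length
instance (n : Int) (labels : List Int) : Decidable (Pre_truthT n labels) := by
  unfold Pre_truthT; infer_instance

def pvWitness_truthT : Int × List Int := (2, [1, 0, 0, 1])

def Spec_truthT (n : Int) (labels : List Int) (out : List (List Int × Int)) : Prop := out = truthT_alt n labels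
instance (n : Int) (labels : List Int) (out : List (List Int × Int)) : Decidable (Spec_truthT n labels out) := by unfold Spec_truthT; infer_instance

-- ===== CLAIM (what is proved, stated in full; the proofs are below) =====
def Claim_equal_truthT : Prop := ∀ (n : Int) (labels : List Int), Dom_truthT n labels → Pre_truthT n labels → Spec_truthT n labels (truthT n labels)

-- ===== LEMMAS AND PROOFS =====

theorem prodA_succ (k : Nat) :
    prodA (k + 1) = ((prodA k).map (fun t => (0 : Int) :: t)) ++ ((prodA k).map (fun t => (1 : Int) :: t)) := by
  simp [prodA, List.flatMap]

theorem prodA_pairwise_lt (k : Nat) : (prodA k).Pairwise (· < ·) := by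
  induction k with
  | zero => simp [prodA]
  | succ k ih =>
    rw [prodA_succ]
    refine List.pairwise_append.mpr ⟨?_, ?_, ?_⟩
    · exact (List.pairwise_map).mpr (ih.imp (fun h => by
        rw [List.cons_lt_cons_iff]; exact Or.inr ⟨rfl, h⟩))
    · exact (List.pairwise_map).mpr (ih.imp (fun h => by
        rw [List.cons_lt_cons_iff]; exact Or.inr ⟨rfl, h⟩))
    · intro a ha b hb
      obtain ⟨x, -, rfl⟩ := List.mem_map.mp ha
      obtain ⟨y, -, rfl⟩ := List.mem_map.mp hb
      rw [List.cons_lt_cons_iff]; exact Or.inl (by norm_num)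

theorem rowB_lo (k i : Nat) (h : i < 2 ^ k) : rowB (k + 1) i = 0 :: rowB k i := by
  unfold rowB
  rw [List.range_succ_eq_map]
  simp only [List.map_cons, List.map_map]
  rw [List.cons_eq_cons]
  refine ⟨?_, ?_⟩
  · simp only [Nat.add_sub_cancel, Nat.sub_zero]
    have h0 : i >>> k = 0 := by
      rw [Nat.shiftRight_eq_div_pow]; exact Nat.div_eq_of_lt h
    simp [h0]
  · apply List.map_congr_left
    intro j hj
    simp only [Function.comp, Nat.succ_eq_add_one]
    have hsub : k + 1 - 1 - (j + 1) = k - 1 - j := by omega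
    rw [hsub]

theorem shift_and_one_add_pow (k s i : Nat) (hs : s < k) :
    ((2 ^ k + i) >>> s) &&& 1 = (i >>> s) &&& 1 := by
  rw [Nat.and_one_is_mod, Nat.and_one_is_mod, Nat.shiftRight_eq_div_pow, Nat.shiftRight_eq_div_pow]
  have hk : 2 ^ k = 2 ^ (k - s) * 2 ^ s := by
    rw [← pow_add]; congr 1; omega
  rw [hk, Nat.add_comm, Nat.add_mul_div_right _ _ (Nat.two_pow_pos s)]
  have heven : 2 ^ (k - s) = 2 * 2 ^ (k - s - 1) := by
    rw [← pow_succ']; congr 1; omega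
  rw [heven, Nat.add_mul_mod_self_left]

theorem rowB_hi (k i : Nat) (h : i < 2 ^ k) : rowB (k + 1) (2 ^ k + i) = 1 :: rowB k i := by
  unfold rowB
  rw [List.range_succ_eq_map]
  simp only [List.map_cons, List.map_map]
  rw [List.cons_eq_cons]
  refine ⟨?_, ?_⟩
  · simp only [Nat.add_sub_cancel, Nat.sub_zero]
    have h1 : (2 ^ k + i) >>> k = 1 := by
      rw [Nat.shiftRight_eq_div_pow, Nat.add_comm,
        Nat.add_div_right _ (Nat.two_pow_pos k), Nat.div_eq_of_lt h]
    simp [h1]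
  · apply List.map_congr_left
    intro j hj
    simp only [Function.comp, Nat.succ_eq_add_one]
    have hsub : k + 1 - 1 - (j + 1) = k - 1 - j := by omega
    rw [hsub]
    have hlt : k - 1 - j < k := by
      simp only [List.mem_range] at hj; omega
    rw [shift_and_one_add_pow k (k - 1 - j) i hlt]

theorem prodA_eq_map_rowB (k : Nat) : prodA k = (List.range (2 ^ k)).map (rowB k) := by
  induction k with
  | zero => simp [prodA, rowB]
  | succ k ih =>
    rw [prodA_succ, ih]
    have hpow : 2 ^ (k + 1) = 2 ^ k + 2 ^ k := by ring
    rw [hpow, List.range_add, List.map_append, List.map_map, List.map_map, List.map_map]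
    congr 1
    · apply List.map_congr_left
      intro i hi
      simp only [List.mem_range] at hi
      exact (rowB_lo k i hi).symm
    · apply List.map_congr_left
      intro i hi
      simp only [List.mem_range] at hi
      simp only [Function.comp]
      exact (rowB_hi k i hi).symm

theorem sorted_prodA (k : Nat) :
    PySem.List.sorted (prodA k) (fun x => x) = prodA k := by
  have h := PySem.List.sorted_eq_of_perm_of_pairwise_lt (prodA k) (prodA k) (fun x => x)
    (List.Perm.refl _) (prodA_pairwise_lt k)
  rw [← h]
  congr 1

-- ===== VERDICT (by name: the statement is the Claim_ definition above) =====
theorem truthT_spec : Claim_equal_truthT := by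
  intro n labels _ hpre
  obtain ⟨hn, hlen⟩ := hpre
  show truthT n labels = truthT_alt n labels
  unfold truthT truthT_alt
  rw [sorted_prodA, prodA_eq_map_rowB]
  set k := n.toNat with hk
  rw [PySem.List.foldl_append_singleton_eq_map, List.nil_append]
  have hlenz : PySem.List.len ((List.range (2 ^ k)).map (rowB k)) = ((2 ^ k : Nat) : Int) := by
    simp [PySem.List.len_eq]
  rw [hlenz]
  have hr : PySem.List.pyRange 0 ((2 ^ k : Nat) : Int) 1
      = (List.range (2 ^ k)).map (fun (j : Nat) => (j : Int)) := by
    rw [PySem.List.pyRange_one]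
    simp only [Int.sub_zero, Int.toNat_natCast, zero_add]
  rw [hr, List.map_map]
  apply List.map_congr_left
  intro j hj
  simp only [List.mem_range] at hj
  simp only [Function.comp]
  congr 1
  rw [PySem.List.pyGetD_natCast, List.getD_eq_getElem?_getD,
    List.getElem?_map, List.getElem?_range hj]
  simp
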